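-- pv_equiv track=rewrite | github.com/satyamskillz/DSA-Course | Week-2 Algorithmic Warmup/7_last_digit_of_the_sum_of_fibonacci_numbers_again/fibonacci_partial_sum.py | feb
-- ===== SOURCE A (Python) =====
-- def feb(index,x):
--     if(index<=0):
--         return (index)
--     else:
--         f=[0, 1]
--         s=[0,1]
--         for i in range(2, index+x):
--             f.append((f[i-1]+f[i-2]))
--             s.append((s[i-1]+f[i]))
--         return (s[index-(1-x)])
-- ===== SOURCE B (Python) =====
-- def _fib(n):
--     # fast doubling: returns (F(n), F(n+1)) for n >= 0
--     if n == 0: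
--         return (0, 1)
--     a, b = _fib(n >> 1)
--     c = a * (2 * b - a)
--     d = a * a + b * b
--     if n & 1:
--         return (d, c + d)
--     return (c, d)
--
--
-- def feb(index, x):
--     if index <= 0:
--         return index
--     # sum of the first index+x Fibonacci numbers F(0)..F(index+x-1) equals F(index+x+1) - 1
--     return _fib(index + x + 1)[0] - 1
-- ===== Notes on version B (the rewrite author's own statement) =====
-- stated objective: faster
-- what changed: Replaced the O(n) big-int loop that materialises the full Fibonacci and prefix-sum lists with fast-doubling Fibonacci plus the identity sum F_0..F_{n-1} = F_{n+1}-1.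
-- intended difference: For index>0 with -1 <= index+x <= 0 A hits its [0,1] seed lists with a negative index and Python's wraparound returns 1 (index+x=0) or 0 (index+x=-1), while B returns the true partial sum F(index+x+1)-1, i.e. 0 and -1, which is what the sum identity intends. — e.g. on feb(1, -1): A returns 1, B returns 0
import Mathlib
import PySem

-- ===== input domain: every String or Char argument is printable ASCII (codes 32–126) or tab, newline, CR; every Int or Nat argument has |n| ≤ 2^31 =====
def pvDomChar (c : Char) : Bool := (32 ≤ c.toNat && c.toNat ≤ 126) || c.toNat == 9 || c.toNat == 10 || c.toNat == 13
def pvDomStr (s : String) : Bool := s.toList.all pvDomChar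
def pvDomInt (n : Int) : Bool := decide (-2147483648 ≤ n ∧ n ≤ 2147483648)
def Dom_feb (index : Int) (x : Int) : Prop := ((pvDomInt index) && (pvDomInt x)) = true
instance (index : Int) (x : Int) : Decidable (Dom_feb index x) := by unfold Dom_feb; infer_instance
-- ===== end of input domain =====

-- B replaces A's O(n) list-building loop by fast-doubling Fibonacci with the identity ΣF_i = F_{n+1}-1 (objective: faster).

-- ===== PORT A =====
-- loop body of A: appends f[i-1]+f[i-2] to f, then s[i-1]+f[i] to s (indices always in range inside the loop)
def stepA (p : List Int × List Int) (i : Int) : List Int × List Int :=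
  let f := p.1 ++ [PySem.List.pyGetD p.1 (i - 1) 0 + PySem.List.pyGetD p.1 (i - 2) 0]
  let s := p.2 ++ [PySem.List.pyGetD p.2 (i - 1) 0 + PySem.List.pyGetD f i 0]
  (f, s)

def feb (index : Int) (x : Int) : Int :=
  if index ≤ 0 then index
  else
    let fs := (PySem.List.pyRange 2 (index + x) 1).foldl stepA ([0, 1], [0, 1])
    PySem.List.pyGetD fs.2 (index - (1 - x)) 0   -- s[index-(1-x)]; in range exactly on Pre_feb

-- ===== PORT B =====
-- fast doubling: fibPairAux fuel n = (F(n), F(n+1)) whenever n ≤ fuel; Source B recurses on n >> 1 = n / 2,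
-- the fuel only makes that recursion structural
def fibPairAux : Nat → Nat → Int × Int
  | _, 0 => (0, 1)
  | 0, _ + 1 => (0, 1)            -- never reached when fuel ≥ n
  | fuel + 1, n + 1 =>
    let p := fibPairAux fuel ((n + 1) / 2)
    let a := p.1
    let b := p.2
    let c := a * (2 * b - a)
    let d := a * a + b * b
    if (n + 1) % 2 = 1 then (d, c + d) else (c, d)

def fibPair (n : Nat) : Int × Int := fibPairAux n n

def feb_alt (index : Int) (x : Int) : Int :=
  if index ≤ 0 then index
  else (fibPair (index + x + 1).toNat).1 - 1   -- index + x + 1 ≥ 0 holds on Pre_feb, so toNat is exact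

-- ===== PRECONDITION & SPEC =====
-- Pre_feb excludes exactly the inputs on which A raises IndexError: index > 0 with index + x ≤ -2
-- (the final lookup s[index+x-1] is then out of range of the 2-element seed lists).
def Pre_feb (index : Int) (x : Int) : Prop := index ≤ 0 ∨ -1 ≤ index + x

instance (index : Int) (x : Int) : Decidable (Pre_feb index x) := by unfold Pre_feb; infer_instance

def pvWitness_feb : Int × Int := (3, 0)

-- For index>0 with -1 ≤ index+x ≤ 0 A indexes its [0,1] seed lists with a negative index and Python's
-- wraparound returns 1 (at index+x=0) or 0 (at index+x=-1), while B returns the true partial sum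
-- F(index+x+1)-1, i.e. 0 and -1 — the value the sum identity intends.
def D_feb (index : Int) (x : Int) : Prop := 0 < index ∧ index + x ≤ 0

instance (index : Int) (x : Int) : Decidable (D_feb index x) := by unfold D_feb; infer_instance

def Spec_feb (index : Int) (x : Int) (out : Int) : Prop := ¬ D_feb index x → out = feb_alt index x
instance (index : Int) (x : Int) (out : Int) : Decidable (Spec_feb index x out) := by unfold Spec_feb; infer_instance

def pvDiffWitness_feb : Int × Int := (1, -1)
def pvDiffWitnessOut_feb : Int × Int := (1, 0)

-- ===== CLAIM (what is proved, stated in full; the proofs are below) =====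
def Claim_unchanged_feb : Prop := ∀ (index : Int) (x : Int), Dom_feb index x → Pre_feb index x → Spec_feb index x (feb index x)
def Claim_changed_feb : Prop := Dom_feb (pvDiffWitness_feb.1) (pvDiffWitness_feb.2) ∧ Pre_feb (pvDiffWitness_feb.1) (pvDiffWitness_feb.2) ∧ D_feb (pvDiffWitness_feb.1) (pvDiffWitness_feb.2) ∧ feb (pvDiffWitness_feb.1) (pvDiffWitness_feb.2) = pvDiffWitnessOut_feb.1 ∧ feb_alt (pvDiffWitness_feb.1) (pvDiffWitness_feb.2) = pvDiffWitnessOut_feb.2 ∧ pvDiffWitnessOut_feb.1 ≠ pvDiffWitnessOut_feb.2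
def Claim_exact_feb : Prop := ∀ (index : Int) (x : Int), Dom_feb index x → Pre_feb index x → D_feb index x → feb index x ≠ feb_alt index x

-- ===== LEMMAS AND PROOFS =====

lemma int_fib_double (k : Nat) :
    (Nat.fib k : Int) * (2 * Nat.fib (k + 1) - Nat.fib k) = (Nat.fib (2 * k) : Int) := by
  have hle : Nat.fib k ≤ 2 * Nat.fib (k + 1) :=
    le_trans Nat.fib_le_fib_succ (by omega)
  rw [Nat.fib_two_mul, Nat.cast_mul, Nat.cast_sub hle]
  push_cast
  ring

lemma int_fib_double_add_one (k : Nat) :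
    (Nat.fib k : Int) * Nat.fib k + (Nat.fib (k + 1) : Int) * Nat.fib (k + 1)
      = (Nat.fib (2 * k + 1) : Int) := by
  rw [Nat.fib_two_mul_add_one]
  push_cast
  ring

lemma fibPairAux_eq (fuel : Nat) : ∀ n : Nat, n ≤ fuel →
    fibPairAux fuel n = ((Nat.fib n : Int), (Nat.fib (n + 1) : Int)) := by
  induction fuel with
  | zero =>
    intro n hn
    interval_cases n
    simp [fibPairAux]
  | succ fuel ih =>
    intro n hn
    match n with
    | 0 => simp [fibPairAux]
    | Nat.succ m =>
      have hrec := ih ((m + 1) / 2) (by omega)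
      rw [fibPairAux, hrec]
      set k := (m + 1) / 2 with hk
      simp only [Nat.succ_eq_add_one]
      by_cases hodd : (m + 1) % 2 = 1
      · have hm : m + 1 = 2 * k + 1 := by omega
        simp only [hodd, if_pos]
        rw [hm]
        refine Prod.ext ?_ ?_
        · simpa using int_fib_double_add_one k
        · show (Nat.fib k : Int) * (2 * Nat.fib (k + 1) - Nat.fib k)
              + ((Nat.fib k : Int) * Nat.fib k + (Nat.fib (k + 1) : Int) * Nat.fib (k + 1))
              = (Nat.fib (2 * k + 1 + 1) : Int)
          rw [show 2 * k + 1 + 1 = 2 * k + 2 from rfl, Nat.fib_add_two]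
          push_cast
          rw [← int_fib_double k, ← int_fib_double_add_one k]
      · have hm : m + 1 = 2 * k := by omega
        simp only [hodd, if_neg, not_false_iff]
        rw [hm]
        refine Prod.ext ?_ ?_
        · simpa using int_fib_double k
        · simpa using int_fib_double_add_one k

lemma fibPair_eq (n : Nat) : fibPair n = ((Nat.fib n : Int), (Nat.fib (n + 1) : Int)) :=
  fibPairAux_eq n n le_rfl

def fA (i : Nat) : Int := Nat.fib i
def sA (i : Nat) : Int := (Nat.fib (i + 2) : Int) - 1

lemma getD_map_range' (g : Nat → Int) (n k : Nat) (hk : k < n) :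
    ((List.range n).map g).getD k 0 = g k := by
  simp [List.getD_eq_getElem?_getD, hk]

lemma loopA (n : Nat) (hn : 2 ≤ n) :
    (PySem.List.pyRange 2 (n : Int) 1).foldl stepA ([0, 1], [0, 1])
      = ((List.range n).map fA, (List.range n).map sA) := by
  induction n, hn using Nat.le_induction with
  | base =>
    rw [show ((2 : Nat) : Int) = 2 by norm_num, PySem.List.pyRange_one_eq_nil (by norm_num)]
    simp [List.range_succ, fA, sA]
    norm_num [show Nat.fib 3 = 2 from rfl]
  | succ n hn ih =>
    have hc : ((n + 1 : Nat) : Int) = (n : Int) + 1 := by push_cast; ring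
    rw [hc, PySem.List.pyRange_one_succ_right (by exact_mod_cast by omega : (2 : Int) ≤ (n : Int)),
      List.foldl_append, ih]
    simp only [List.foldl_cons, List.foldl_nil, stepA]
    have h1 : (n : Int) - 1 = ((n - 1 : Nat) : Int) := by omega
    have h2 : (n : Int) - 2 = ((n - 2 : Nat) : Int) := by omega
    rw [h1, h2]
    simp only [PySem.List.pyGetD_natCast]
    rw [getD_map_range' fA (n) (n - 1) (by omega), getD_map_range' fA n (n - 2) (by omega),
      getD_map_range' sA n (n - 1) (by omega)]
    have hfn : fA (n - 1) + fA (n - 2) = fA n := by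
      have hnat : Nat.fib (n - 2) + Nat.fib (n - 1) = Nat.fib n := by
        conv_rhs => rw [show n = n - 2 + 2 by omega]
        rw [Nat.fib_add_two, show n - 2 + 1 = n - 1 by omega]
      unfold fA
      omega
    have hfull : (List.range n).map fA ++ [fA (n - 1) + fA (n - 2)] = (List.range (n + 1)).map fA := by
      rw [hfn, List.range_succ, List.map_append]
      rfl
    rw [hfull]
    have hgetn : ((List.range (n + 1)).map fA).getD n 0 = fA n :=
      getD_map_range' fA (n + 1) n (by omega)
    rw [hgetn]
    have hsn : sA (n - 1) + fA n = sA n := by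
      unfold sA fA
      have h3 : n - 1 + 2 = n + 1 := by omega
      rw [h3, Nat.fib_add_two]
      push_cast
      ring
    rw [hsn]
    simp [List.range_succ]

-- ===== VERDICT (by name: the statement is the Claim_ definition above) =====
theorem feb_spec : Claim_unchanged_feb := by
  unfold Claim_unchanged_feb Spec_feb
  intro index x hdom hpre hnd
  by_cases hle : index ≤ 0
  · simp [feb, feb_alt, hle]
  · have hge1 : 1 ≤ index + x := by
      by_contra hcon
      exact hnd ⟨by omega, by omega⟩
    obtain ⟨n, hcast⟩ : ∃ n : Nat, (n : Int) = index + x := ⟨(index + x).toNat, by omega⟩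
    simp only [feb, feb_alt, if_neg hle]
    rw [show index - (1 - x) = index + x - 1 by ring, ← hcast]
    have hn1 : 1 ≤ n := by omega
    by_cases h2 : 2 ≤ n
    · rw [loopA n h2]
      have ht : ((n : Int) + 1).toNat = n + 1 := by omega
      rw [ht, fibPair_eq]
      rw [show (n : Int) - 1 = ((n - 1 : Nat) : Int) by omega, PySem.List.pyGetD_natCast,
        getD_map_range' sA n (n - 1) (by omega)]
      unfold sA
      rw [show n - 1 + 2 = n + 1 by omega]
    · have : n = 1 := by omega
      subst this
      decide

theorem feb_changed : Claim_changed_feb := by unfold Claim_changed_feb; decide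

theorem feb_tight : Claim_exact_feb := by
  unfold Claim_exact_feb D_feb Pre_feb
  intro index x hdom hpre hd
  obtain ⟨hipos, hle0⟩ := hd
  have hge : -1 ≤ index + x := by
    rcases hpre with h | h
    · omega
    · exact h
  have hle : ¬ index ≤ 0 := by omega
  simp only [feb, feb_alt, if_neg hle]
  rw [PySem.List.pyRange_one_eq_nil (by omega : index + x ≤ 2)]
  simp only [List.foldl_nil]
  rw [show index - (1 - x) = index + x - 1 by ring]
  have hcase : index + x = 0 ∨ index + x = -1 := by omega
  rcases hcase with h | h <;> rw [h] <;> decide
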